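-- pv_equiv track=rewrite | github.com/olivierjuanedf/eurec-2026-vahidemad | include/dataset_builder.py | set_per_origin_bus_links_msg
-- ===== SOURCE A (Python) =====
-- from typing import Dict, List, Tuple, Optional, Union
--
-- def set_per_origin_bus_links_msg(link_names: List[str]) -> str:
--     link_sep = '-'
--     links_msg = ''
--     n_links = len(link_names)
--     i_link = 0
--     while i_link < n_links:
--         common_origin_links = [link_names[i_link]]
--         origin = link_names[i_link].split(link_sep)[0]
--         j = 1
--         while i_link + j < n_links:
--             current_origin = link_names[i_link + j].split(link_sep)[0]
--             if current_origin == origin: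
--                 common_origin_links.append(link_names[i_link + j])
--                 j += 1
--             else:
--                 break
--         links_msg += f'\n- from {origin}: {[tuple(elt_link.split(link_sep)) for elt_link in common_origin_links]}'
--         i_link += j
--     return links_msg
-- ===== SOURCE B (Python) =====
-- def set_per_origin_bus_links_msg(link_names):
--     link_sep = '-'
--     groups = []  # list of (origin, [members]) pairs, consecutive runs
--     for name in link_names:
--         origin = name.split(link_sep)[0]
--         if groups and groups[-1][0] == origin:
--             groups[-1][1].append(name)
--         else:
--             groups.append((origin, [name]))
--     return ''.join(
--         f'\n- from {origin}: {[tuple(n.split(link_sep)) for n in members]}'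
--         for origin, members in groups
--     )
-- ===== Notes on version B (the rewrite author's own statement) =====
-- stated objective: faster
-- what changed: Replaces the nested index-arithmetic while-loops and quadratic string += accumulation with a single pass folding the list into (origin, run) groups by checking the last group, then one join over the formatted groups.
import Mathlib
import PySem

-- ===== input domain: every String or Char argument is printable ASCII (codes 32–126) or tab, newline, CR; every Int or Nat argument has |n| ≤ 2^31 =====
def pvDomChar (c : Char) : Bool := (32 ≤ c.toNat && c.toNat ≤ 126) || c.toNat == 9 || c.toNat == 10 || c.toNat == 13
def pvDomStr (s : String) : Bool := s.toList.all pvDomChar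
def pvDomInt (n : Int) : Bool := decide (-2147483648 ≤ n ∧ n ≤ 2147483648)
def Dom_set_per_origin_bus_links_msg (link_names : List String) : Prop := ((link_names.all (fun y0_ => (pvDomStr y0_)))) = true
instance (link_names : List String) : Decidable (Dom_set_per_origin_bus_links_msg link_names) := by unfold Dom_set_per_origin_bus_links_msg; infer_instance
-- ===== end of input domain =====

-- B replaces A's nested index-arithmetic while-loops and string += accumulation by one fold building consecutive (origin, run) groups and a final format-and-join (measured faster in a timing run).

-- Shared formatting helpers: the Python f-string '\n- from {origin}: {[tuple(...)]}'
-- i.e. repr of a str / of a tuple of strs / of a list of such tuples (exact on the ASCII domain).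
def pvEscChar (q : Char) (c : Char) : List Char :=
  if c = '\\' then ['\\', '\\']
  else if c = q then ['\\', q]
  else if c = '\t' then ['\\', 't']
  else if c = '\n' then ['\\', 'n']
  else if c = '\r' then ['\\', 'r']
  else [c]

def pyReprStr (s : String) : String :=
  let cs := s.toList
  let q : Char := if cs.contains '\'' && !(cs.contains '"') then '"' else '\''
  String.ofList (q :: (cs.flatMap (pvEscChar q) ++ [q]))

def pyReprTuple (parts : List String) : String :=
  match parts with
  | [p] => "(" ++ pyReprStr p ++ ",)"
  | _ => "(" ++ PySem.Str.join ", " (parts.map pyReprStr) ++ ")"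

-- origin = name.split('-')[0] (split('-') is always nonempty in Python)
def pvKey (s : String) : String := ((PySem.Str.split? s "-").getD []).headD ""

-- the whole f-string appended for one group
def pvFmt (origin : String) (members : List String) : String :=
  "\n- from " ++ origin ++ ": [" ++
    PySem.Str.join ", " (members.map (fun n => pyReprTuple (((PySem.Str.split? n "-").getD [])))) ++ "]"

-- ===== PORT A =====
-- inner while: extends the run while the next link has the same origin; returns (common_origin_links, j)
def pvInnerA (xs : List String) (origin : String) (i : Nat) (j : Nat) (acc : List String) :
    List String × Nat :=
  if _h : i + j < xs.length then
    let cur := xs.getD (i + j) ""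
    if pvKey cur == origin then pvInnerA xs origin i (j + 1) (acc ++ [cur])
    else (acc, j)
  else (acc, j)
termination_by xs.length - (i + j)
decreasing_by exact Nat.sub_succ_lt_self _ _ _h

-- needed for pvOuterA's termination: the inner loop never decreases j
theorem pvInnerA_le (xs : List String) (origin : String) (i j : Nat) (acc : List String) :
    j ≤ (pvInnerA xs origin i j acc).2 := by
  fun_induction pvInnerA with
  | case1 _ _ _ _ _ ih => omega
  | case2 _ _ _ _ _ => simp
  | case3 _ _ _ => simp

-- outer while over i_link
def pvOuterA (xs : List String) (i : Nat) (acc : String) : String :=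
  if h : i < xs.length then
    let name := xs.getD i ""
    let origin := pvKey name
    let r := pvInnerA xs origin i 1 [name]
    pvOuterA xs (i + r.2) (acc ++ pvFmt origin r.1)
  else acc
termination_by xs.length - i
decreasing_by
  exact Nat.sub_lt_sub_left h
    (Nat.lt_add_of_pos_right (pvInnerA_le xs (pvKey (xs.getD i "")) i 1 [xs.getD i ""]))

def set_per_origin_bus_links_msg (link_names : List String) : String :=
  pvOuterA link_names 0 ""

-- ===== PORT B =====
-- fold step: groups kept head-first (head = Python's groups[-1]); reversed before rendering
def pvStepB (gs : List (String × List String)) (name : String) : List (String × List String) :=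
  let origin := pvKey name
  match gs with
  | (o, ms) :: rest => if o == origin then (o, ms ++ [name]) :: rest else (origin, [name]) :: (o, ms) :: rest
  | [] => [(origin, [name])]

def set_per_origin_bus_links_msg_alt (link_names : List String) : String :=
  let groups := link_names.foldl pvStepB []
  PySem.Str.join "" (groups.reverse.map (fun p => pvFmt p.1 p.2))

-- ===== PRECONDITION & SPEC =====
def Spec_set_per_origin_bus_links_msg (link_names : List String) (out : String) : Prop := out = set_per_origin_bus_links_msg_alt link_names
instance (link_names : List String) (out : String) : Decidable (Spec_set_per_origin_bus_links_msg link_names out) := by unfold Spec_set_per_origin_bus_links_msg; infer_instance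

-- ===== CLAIM (what is proved, stated in full; the proofs are below) =====
def Claim_equal_set_per_origin_bus_links_msg : Prop := ∀ (link_names : List String), Dom_set_per_origin_bus_links_msg link_names → Spec_set_per_origin_bus_links_msg link_names (set_per_origin_bus_links_msg link_names)

-- ===== LEMMAS AND PROOFS =====

-- canonical run-by-run description both ports are reduced to
def pvG : List String → String
  | [] => ""
  | n :: rest =>
      pvFmt (pvKey n) (n :: rest.takeWhile (fun m => pvKey m == pvKey n)) ++
        pvG (rest.dropWhile (fun m => pvKey m == pvKey n))
termination_by l => l.length
decreasing_by
  exact Nat.lt_succ_of_le (List.length_dropWhile_le (fun m => pvKey m == pvKey n) rest)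

theorem pvJoin_nil : PySem.Str.join "" ([] : List String) = "" := by
  simp [PySem.Str.join, PySem.Chars.join, List.intercalate]

theorem pvJoin_cons (a : String) (l : List String) :
    PySem.Str.join "" (a :: l) = a ++ PySem.Str.join "" l := by
  cases l <;>
    simp [PySem.Str.join, PySem.Chars.join, List.intercalate, String.ofList_toList]

theorem pvJoin_append (l₁ l₂ : List String) :
    PySem.Str.join "" (l₁ ++ l₂) = PySem.Str.join "" l₁ ++ PySem.Str.join "" l₂ := by
  induction l₁ with
  | nil => simp [pvJoin_nil]
  | cons a t ih => simp [pvJoin_cons, ih, String.append_assoc]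

def pvRender (gs : List (String × List String)) : String :=
  PySem.Str.join "" (gs.reverse.map (fun p => pvFmt p.1 p.2))

theorem pvRender_cons (o : String) (ms : List String) (gs : List (String × List String)) :
    pvRender ((o, ms) :: gs) = pvRender gs ++ pvFmt o ms := by
  simp [pvRender, pvJoin_append, pvJoin_cons, pvJoin_nil]

theorem pvDrop_takeWhile_len (p : String → Bool) (l : List String) :
    l.drop (l.takeWhile p).length = l.dropWhile p := by
  induction l with
  | nil => simp
  | cons a t ih =>
      by_cases hp : p a
      · simp [hp, ih]
      · simp [hp]

theorem pvInnerA_eq (xs : List String) (origin : String) (i j : Nat) (acc : List String) :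
    pvInnerA xs origin i j acc =
      (acc ++ (xs.drop (i + j)).takeWhile (fun m => pvKey m == origin),
       j + ((xs.drop (i + j)).takeWhile (fun m => pvKey m == origin)).length) := by
  fun_induction pvInnerA with
  | case1 j acc h cur hkey ih =>
      have hd : xs.drop (i + j) = cur :: xs.drop (i + j + 1) := by
        rw [List.drop_eq_getElem_cons h]
        simp [cur, List.getElem?_eq_getElem h]
      rw [ih, hd]
      have hij : i + (j + 1) = i + j + 1 := by omega
      rw [hij]
      refine Prod.ext ?_ ?_
      · simp [hkey]
      · simp [hkey]; omega
  | case2 j acc h cur hkey =>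
      have hd : xs.drop (i + j) = cur :: xs.drop (i + j + 1) := by
        rw [List.drop_eq_getElem_cons h]
        simp [cur, List.getElem?_eq_getElem h]
      simp [hd, hkey]
  | case3 j acc h =>
      have hd : xs.drop (i + j) = [] := List.drop_eq_nil_of_le (by omega)
      simp [hd]

theorem pvOuterA_eq (xs : List String) (i : Nat) (acc : String) :
    pvOuterA xs i acc = acc ++ pvG (xs.drop i) := by
  fun_induction pvOuterA with
  | case1 i acc h name origin r ih =>
      have hname : name = xs[i] := by simp [name, List.getElem?_eq_getElem h]
      have hd : xs.drop i = xs[i] :: xs.drop (i + 1) := List.drop_eq_getElem_cons h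
      have hr : r = ([xs[i]] ++ (xs.drop (i + 1)).takeWhile (fun m => pvKey m == pvKey xs[i]),
          1 + ((xs.drop (i + 1)).takeWhile (fun m => pvKey m == pvKey xs[i])).length) := by
        simp only [r, origin, hname]
        simpa using pvInnerA_eq xs (pvKey xs[i]) i 1 [xs[i]]
      have hdrop : xs.drop (i + r.2) =
          (xs.drop (i + 1)).dropWhile (fun m => pvKey m == pvKey xs[i]) := by
        rw [hr]
        have h2 : i + (1 + ((xs.drop (i + 1)).takeWhile (fun m => pvKey m == pvKey xs[i])).length)
            = (i + 1) + ((xs.drop (i + 1)).takeWhile (fun m => pvKey m == pvKey xs[i])).length := by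
          omega
        rw [h2, ← List.drop_drop, pvDrop_takeWhile_len]
      rw [ih, hdrop]
      conv_rhs => rw [hd, pvG]
      rw [hr]
      simp [origin, hname, String.append_assoc]
  | case2 i acc h =>
      have hd : xs.drop i = [] := List.drop_eq_nil_of_le (by omega)
      simp [hd, pvG]

theorem pvFoldB_eq (l : List String) (o : String) (ms : List String)
    (gs : List (String × List String)) :
    pvRender (l.foldl pvStepB ((o, ms) :: gs)) =
      pvRender gs ++ pvFmt o (ms ++ l.takeWhile (fun m => pvKey m == o)) ++
        pvG (l.dropWhile (fun m => pvKey m == o)) := by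
  induction l generalizing o ms gs with
  | nil => simp [pvRender_cons, pvG]
  | cons n rest ih =>
      by_cases hk : o = pvKey n
      · have hstep : pvStepB ((o, ms) :: gs) n = (o, ms ++ [n]) :: gs := by
          simp [pvStepB, hk]
        have htw : pvKey n == o := by simp [hk]
        rw [List.foldl_cons, hstep, ih]
        simp [htw, String.append_assoc]
      · have hstep : pvStepB ((o, ms) :: gs) n = (pvKey n, [n]) :: (o, ms) :: gs := by
          simp [pvStepB, hk]
        have htw : (pvKey n == o) = false := by simp; exact fun h => hk h.symm
        rw [List.foldl_cons, hstep, ih, pvRender_cons]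
        simp [htw, pvG, String.append_assoc]

theorem pvAlt_eq_G (xs : List String) : set_per_origin_bus_links_msg_alt xs = pvG xs := by
  cases xs with
  | nil => simp [set_per_origin_bus_links_msg_alt, pvJoin_nil, pvG]
  | cons n rest =>
      have h0 : pvStepB [] n = [(pvKey n, [n])] := by simp [pvStepB]
      show PySem.Str.join "" (((n :: rest).foldl pvStepB []).reverse.map
          (fun p => pvFmt p.1 p.2)) = pvG (n :: rest)
      rw [List.foldl_cons, h0]
      have := pvFoldB_eq rest (pvKey n) [n] []
      simp only [pvRender] at this
      rw [this]
      simp [pvJoin_nil, pvG]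

-- ===== VERDICT (by name: the statement is the Claim_ definition above) =====
theorem set_per_origin_bus_links_msg_spec : Claim_equal_set_per_origin_bus_links_msg := by
  intro xs _
  show set_per_origin_bus_links_msg xs = set_per_origin_bus_links_msg_alt xs
  rw [pvAlt_eq_G, set_per_origin_bus_links_msg, pvOuterA_eq]
  simp
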